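-- pv_equiv track=rewrite | github.com/SKosztolanyi/Python-longer-projects | Caesar cypher/81_Caesar cypher part 1.py | buildCoder
-- ===== SOURCE A (Python) =====
-- import string
--
-- def buildCoder(shift):
--     """
--     Returns a dict that can apply a Caesar cipher to a letter.
--     The cipher is defined by the shift value. Ignores non-letter characters
--     like punctuation, numbers, and spaces.
--
--     shift: 0 <= int < 26
--     returns: dict
--     """
--     ### TODO
--     Dic = {}
--     for i in range(len(string.ascii_lowercase)):
--         encrypting_value = (i + shift) % len(string.ascii_lowercase) # or I could write 26
--     # Because there are 26 ascii characters
--         character = string.ascii_lowercase[i]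
--         encrypted_character = string.ascii_lowercase[encrypting_value]
--         Dic[character] = encrypted_character
--         Dic[character.upper()] = encrypted_character.upper()
--     return Dic
-- ===== SOURCE B (Python) =====
-- import string
--
-- def buildCoder(shift):
--     s = shift % 26
--     rot = string.ascii_lowercase[s:] + string.ascii_lowercase[:s]
--     pairs = []
--     for c, e in zip(string.ascii_lowercase, rot):
--         pairs.append((c, e))
--         pairs.append((c.upper(), e.upper()))
--     return dict(pairs)
-- ===== Notes on version B (the rewrite author's own statement) =====
-- stated objective: idiomatic
-- what changed: B replaces A's per-index modular-arithmetic loop with a whole-alphabet rotation by slicing (lowercase[s:]+lowercase[:s], s = shift % 26) zipped against the alphabet to form all pairs at once.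
import Mathlib
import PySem

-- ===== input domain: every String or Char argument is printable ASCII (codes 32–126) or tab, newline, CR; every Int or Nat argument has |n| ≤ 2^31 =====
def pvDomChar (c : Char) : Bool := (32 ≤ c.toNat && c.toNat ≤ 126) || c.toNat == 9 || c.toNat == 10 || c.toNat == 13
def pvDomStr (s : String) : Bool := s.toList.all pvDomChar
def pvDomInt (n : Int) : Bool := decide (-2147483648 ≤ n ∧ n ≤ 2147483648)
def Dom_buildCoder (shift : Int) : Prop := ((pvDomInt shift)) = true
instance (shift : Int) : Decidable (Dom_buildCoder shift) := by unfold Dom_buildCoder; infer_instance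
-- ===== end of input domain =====

-- ===== PORT A =====
-- B builds the cipher dict from a whole-alphabet rotation (slicing + zip) instead of A's
-- per-index modular-arithmetic loop; objective: idiomatic, equal output for every int shift.
-- string.ascii_lowercase, modelled as its character list (PySem strings are proved on the List Char side)
def asciiLowercase : List Char :=
  ['a','b','c','d','e','f','g','h','i','j','k','l','m',
   'n','o','p','q','r','s','t','u','v','w','x','y','z']

-- loop body of A, kept as a named helper so the fold's step function has a name
def buildCoderStep (shift : Int) (d : PySem.Dict String String) (i : Int) : PySem.Dict String String :=
  let ev := PySem.Int.mod (i + shift) (asciiLowercase.length : Int)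
  match PySem.List.pyGet? asciiLowercase i, PySem.List.pyGet? asciiLowercase ev with
  | some c, some e =>
      (d.insert (String.ofList [c]) (String.ofList [e])).insert
        (String.ofList [PySem.Chars.upperChar c]) (String.ofList [PySem.Chars.upperChar e])
  | _, _ => d  -- unreachable: both indices are always in range

def buildCoder (shift : Int) : List (String × String) :=
  ((PySem.List.pyRange 0 (asciiLowercase.length : Int) 1).foldl
    (buildCoderStep shift) PySem.Dict.empty).items

-- ===== PORT B =====
def buildCoder_alt (shift : Int) : List (String × String) :=
  let s := PySem.Int.mod shift 26
  let rot := PySem.List.slice asciiLowercase (some s) none ++ PySem.List.slice asciiLowercase none (some s)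
  let pairs := (asciiLowercase.zip rot).foldl
    (fun (acc : List (String × String)) p =>
      acc ++ [(String.ofList [p.1], String.ofList [p.2]),
              (String.ofList [PySem.Chars.upperChar p.1], String.ofList [PySem.Chars.upperChar p.2])]) []
  (PySem.Dict.ofList pairs).items

-- ===== PRECONDITION & SPEC =====
def Spec_buildCoder (shift : Int) (out : List (String × String)) : Prop := out = buildCoder_alt shift
instance (shift : Int) (out : List (String × String)) : Decidable (Spec_buildCoder shift out) := by unfold Spec_buildCoder; infer_instance

-- ===== CLAIM (what is proved, stated in full; the proofs are below) =====
def Claim_equal_buildCoder : Prop := ∀ (shift : Int), Dom_buildCoder shift → Spec_buildCoder shift (buildCoder shift)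

-- ===== LEMMAS AND PROOFS =====

-- proof-only helpers: the i-th lowercase letter, and the interleaved pair list both programs produce
def pvLo (j : Nat) : Char := asciiLowercase.getD j 'a'

def pvPairs (t : Nat) : List (String × String) :=
  (List.range 26).flatMap (fun i =>
    [(String.ofList [pvLo i], String.ofList [pvLo ((i + t) % 26)]),
     (String.ofList [PySem.Chars.upperChar (pvLo i)],
      String.ofList [PySem.Chars.upperChar (pvLo ((i + t) % 26))])])

theorem buildCoderStep_mod (shift : Int) :
    buildCoderStep shift = buildCoderStep (PySem.Int.mod shift 26) := by
  funext d i
  unfold buildCoderStep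
  have h : PySem.Int.mod (i + shift) (asciiLowercase.length : Int)
      = PySem.Int.mod (i + PySem.Int.mod shift 26) (asciiLowercase.length : Int) := by
    have hl : ((asciiLowercase.length : Int)) = 26 := by decide
    rw [hl, PySem.Int.mod_eq_emod_of_pos (by norm_num),
        PySem.Int.mod_eq_emod_of_pos (by norm_num),
        PySem.Int.mod_eq_emod_of_pos (by norm_num)]
    omega
  rw [h]

theorem buildCoder_mod (shift : Int) :
    buildCoder shift = buildCoder (PySem.Int.mod shift 26) := by
  unfold buildCoder
  rw [buildCoderStep_mod]

theorem buildCoder_alt_mod (shift : Int) :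
    buildCoder_alt shift = buildCoder_alt (PySem.Int.mod shift 26) := by
  unfold buildCoder_alt
  have h : PySem.Int.mod (PySem.Int.mod shift 26) 26 = PySem.Int.mod shift 26 := by
    rw [PySem.Int.mod_eq_emod_of_pos (by norm_num),
        PySem.Int.mod_eq_emod_of_pos (by norm_num)]
    omega
  rw [h]

-- a fold inserting two fresh-keyed entries per element is a fold inserting one entry over the doubled list
theorem foldl_insert2 {κ ν β : Type} [BEq κ] (l : List β) (k1 k2 : β → κ) (v1 v2 : β → ν)
    (d : PySem.Dict κ ν) :
    l.foldl (fun d i => (d.insert (k1 i) (v1 i)).insert (k2 i) (v2 i)) d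
      = (l.flatMap fun i => [(k1 i, v1 i), (k2 i, v2 i)]).foldl
          (fun d p => d.insert p.1 p.2) d := by
  induction l generalizing d with
  | nil => rfl
  | cons a l ih => simp only [List.foldl_cons, List.flatMap_cons, List.cons_append,
      List.nil_append, ih]

theorem pvKeys_eq (t : Nat) :
    (pvPairs t).map Prod.fst
      = ((List.range 26).flatMap (fun i => [pvLo i, PySem.Chars.upperChar (pvLo i)])).map
          (fun c => String.ofList [c]) := by
  simp [pvPairs, List.map_flatMap]

theorem charKeys_nodup :
    ((List.range 26).flatMap (fun i => [pvLo i, PySem.Chars.upperChar (pvLo i)])).Nodup := by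
  decide

theorem ofListSingleton_inj : Function.Injective (fun c : Char => String.ofList [c]) := by
  intro a b h
  have := congrArg String.toList h
  simpa using this

theorem strKeys_nodup (t : Nat) : ((pvPairs t).map Prod.fst).Nodup := by
  rw [pvKeys_eq]
  exact charKeys_nodup.map ofListSingleton_inj

theorem items_ofList_pvPairs (t : Nat) :
    (PySem.Dict.ofList (pvPairs t)).items = pvPairs t := by
  show ((pvPairs t).foldl (fun d p => d.insert p.1 p.2) PySem.Dict.empty).items = pvPairs t
  rw [PySem.Dict.items_foldl_insert_fresh (pvPairs t) Prod.fst Prod.snd PySem.Dict.empty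
        (fun a _ => PySem.Dict.contains_empty a.1) (strKeys_nodup t)]
  simp [PySem.Dict.empty]

theorem A_eq (s : Int) (h0 : 0 ≤ s) (h1 : s < 26) : buildCoder s = pvPairs s.toNat := by
  unfold buildCoder
  have hR : PySem.List.pyRange 0 (asciiLowercase.length : Int) 1
      = (List.range 26).map (fun (n : Nat) => (n : Int)) := by decide
  rw [hR, List.foldl_map]
  rw [PySem.List.foldl_congr_mem _ _
    (fun d (n : Nat) =>
      (d.insert (String.ofList [pvLo n]) (String.ofList [pvLo ((n + s.toNat) % 26)])).insert
        (String.ofList [PySem.Chars.upperChar (pvLo n)])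
        (String.ofList [PySem.Chars.upperChar (pvLo ((n + s.toNat) % 26))])) _
    (by
      intro d n hn
      have hn26 : n < 26 := List.mem_range.mp hn
      unfold buildCoderStep
      have hev : PySem.Int.mod ((n : Int) + s) (asciiLowercase.length : Int)
          = (((n + s.toNat) % 26 : Nat) : Int) := by
        have hl : ((asciiLowercase.length : Int)) = 26 := by decide
        rw [hl, PySem.Int.mod_eq_emod_of_pos (by norm_num)]
        omega
      have hlt : (n + s.toNat) % 26 < 26 := Nat.mod_lt _ (by norm_num)
      have hlen : asciiLowercase.length = 26 := by decide
      have h1' : PySem.List.pyGet? asciiLowercase (n : Int) = some (pvLo n) := by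
        rw [PySem.List.pyGet?_natCast, List.getElem?_eq_getElem (by omega)]
        simp [pvLo, List.getD_eq_getElem?_getD, List.getElem?_eq_getElem (by omega : n < asciiLowercase.length)]
      have h2' : PySem.List.pyGet? asciiLowercase
            (PySem.Int.mod ((n : Int) + s) (asciiLowercase.length : Int))
          = some (pvLo ((n + s.toNat) % 26)) := by
        rw [hev, PySem.List.pyGet?_natCast, List.getElem?_eq_getElem (by omega)]
        simp [pvLo, List.getD_eq_getElem?_getD,
          List.getElem?_eq_getElem (by omega : (n + s.toNat) % 26 < asciiLowercase.length)]
      simp only [h1', h2'])]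
  rw [foldl_insert2]
  show ((pvPairs s.toNat).foldl (fun d p => d.insert p.1 p.2) PySem.Dict.empty).items = pvPairs s.toNat
  exact items_ofList_pvPairs s.toNat

theorem asciiLowercase_eq_map : asciiLowercase = (List.range 26).map (fun i => pvLo i) := by
  decide

theorem rot_eq_map (s : Int) (h0 : 0 ≤ s) (h1 : s < 26) :
    asciiLowercase.drop s.toNat ++ asciiLowercase.take s.toNat
      = (List.range 26).map (fun i => pvLo ((i + s.toNat) % 26)) := by
  have hlen : asciiLowercase.length = 26 := by decide
  have ht : s.toNat ≤ 26 := by omega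
  apply List.ext_getElem
  · simp [hlen]; omega
  · intro i hi hi'
    have hi26 : i < 26 := by simpa using hi'
    have hdl : (asciiLowercase.drop s.toNat).length = 26 - s.toNat := by simp [hlen]
    rw [List.getElem_map, List.getElem_range]
    by_cases hc : i < 26 - s.toNat
    · rw [List.getElem_append_left (by omega)]
      rw [List.getElem_drop]
      have : (i + s.toNat) % 26 = s.toNat + i := by omega
      rw [this]
      simp [pvLo, List.getD_eq_getElem?_getD,
        List.getElem?_eq_getElem (by omega : s.toNat + i < asciiLowercase.length)]
    · rw [List.getElem_append_right (by omega)]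
      rw [List.getElem_take]
      have : (i + s.toNat) % 26 = i - (26 - s.toNat) := by omega
      rw [this]
      simp [hdl, pvLo, List.getD_eq_getElem?_getD,
        List.getElem?_eq_getElem (by omega : i - (26 - s.toNat) < asciiLowercase.length)]

theorem B_eq (s : Int) (h0 : 0 ≤ s) (h1 : s < 26) : buildCoder_alt s = pvPairs s.toNat := by
  unfold buildCoder_alt
  have hmod : PySem.Int.mod s 26 = s := by
    rw [PySem.Int.mod_eq_emod_of_pos (by norm_num)]; omega
  simp only [hmod, PySem.List.slice_from _ h0, PySem.List.slice_to _ h0,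
    PySem.List.foldl_append_eq_flatMap, List.nil_append]
  rw [rot_eq_map s h0 h1]
  conv_lhs => rw [asciiLowercase_eq_map]
  rw [List.zip_map']
  have : pvPairs s.toNat
      = ((List.range 26).map (fun i => (pvLo i, pvLo ((i + s.toNat) % 26)))).flatMap
          (fun p => [(String.ofList [p.1], String.ofList [p.2]),
                     (String.ofList [PySem.Chars.upperChar p.1],
                      String.ofList [PySem.Chars.upperChar p.2])]) := by
    simp [pvPairs, List.flatMap_map]
  rw [← this, items_ofList_pvPairs]

theorem buildCoder_eq_small (s : Int) (h0 : 0 ≤ s) (h1 : s < 26) :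
    buildCoder s = buildCoder_alt s := by
  rw [A_eq s h0 h1, B_eq s h0 h1]

-- ===== VERDICT (by name: the statement is the Claim_ definition above) =====
theorem buildCoder_spec : Claim_equal_buildCoder := by
  intro shift _
  unfold Spec_buildCoder
  rw [buildCoder_mod, buildCoder_alt_mod]
  exact buildCoder_eq_small _ (PySem.Int.mod_nonneg _ (by norm_num)) (PySem.Int.mod_lt _ (by norm_num))
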